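-- pv_equiv track=rewrite | github.com/Sonata165/PhraseLDM_code | datasets/dataset_utils.py | calculate_bar_id_of_phrases
-- ===== SOURCE A (Python) =====
-- def calculate_bar_id_of_phrases(phrase_annot: list[tuple[str, int]]) -> list[tuple[str, int, int]]:
--     '''
--     Calculate the bar id for each bar based on phrase annotation.
--     return:
--     (phrase_type, phrase_start_bar_id (start from 0), phrase_end_bar_id (start from 0, exclusive))
--     So phrase ret[i] covers bars from ret[i][1] to ret[i][2]-1
--     '''
--     ret = []
--     current_bar_id = 0
--     for phrase in phrase_annot:
--         phrase_type, phrase_length = phrase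
--         phrase_start_bar_id = current_bar_id
--         phrase_end_bar_id = current_bar_id + phrase_length
--         ret.append((phrase_type, phrase_start_bar_id, phrase_end_bar_id))
--         current_bar_id += phrase_length
--     return ret
-- ===== SOURCE B (Python) =====
-- from itertools import accumulate
--
-- def calculate_bar_id_of_phrases(phrase_annot: list[tuple[str, int]]) -> list[tuple[str, int, int]]:
--     bounds = [0] + list(accumulate(length for _, length in phrase_annot))
--     return [(t, start, end) for (t, _), start, end in zip(phrase_annot, bounds, bounds[1:])]
-- ===== Notes on version B (the rewrite author's own statement) =====
-- stated objective: idiomatic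
-- what changed: Replaces the fused running-accumulator loop that appends triples one by one with a two-stage decomposition: precompute the prefix-sum boundary table with itertools.accumulate, then pair phrase types with consecutive boundaries in a single zip comprehension.
import Mathlib
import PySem

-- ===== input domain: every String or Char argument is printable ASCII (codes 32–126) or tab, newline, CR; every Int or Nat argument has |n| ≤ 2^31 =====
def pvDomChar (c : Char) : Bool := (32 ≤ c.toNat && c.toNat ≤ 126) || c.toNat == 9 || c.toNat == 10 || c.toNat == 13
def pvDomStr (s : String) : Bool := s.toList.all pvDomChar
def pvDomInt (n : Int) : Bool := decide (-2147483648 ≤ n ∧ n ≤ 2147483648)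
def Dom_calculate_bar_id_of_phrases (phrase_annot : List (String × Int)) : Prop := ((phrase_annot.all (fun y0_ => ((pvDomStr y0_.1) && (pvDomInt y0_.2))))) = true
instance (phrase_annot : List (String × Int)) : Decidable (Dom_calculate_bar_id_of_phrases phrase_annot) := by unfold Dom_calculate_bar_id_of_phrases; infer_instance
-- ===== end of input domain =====

-- B replaces A's fused running-accumulator loop by a prefix-sum boundary table followed by a zip pairing pass (idiomatic decomposition).


-- ===== PORT A =====
-- A: single loop keeping (ret, current_bar_id), appending one triple per phrase.
def calculate_bar_id_of_phrases (phrase_annot : List (String × Int)) : List (String × Int × Int) :=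
  (phrase_annot.foldl
    (fun (s : List (String × Int × Int) × Int) phrase =>
      let phrase_type := phrase.1
      let phrase_length := phrase.2
      let phrase_start_bar_id := s.2
      let phrase_end_bar_id := s.2 + phrase_length
      (s.1 ++ [(phrase_type, phrase_start_bar_id, phrase_end_bar_id)], s.2 + phrase_length))
    ([], 0)).1

-- ===== PORT B =====
-- B-side helper: itertools.accumulate of the lengths, starting from a running total.
def pvAccum : Int → List Int → List Int
  | _, [] => []
  | acc, x :: xs => (acc + x) :: pvAccum (acc + x) xs

def calculate_bar_id_of_phrases_alt (phrase_annot : List (String × Int)) : List (String × Int × Int) :=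
  let bounds : List Int := 0 :: pvAccum 0 (phrase_annot.map (·.2))
  (phrase_annot.zip (bounds.zip (bounds.drop 1))).map
    (fun x => (x.1.1, x.2.1, x.2.2))

-- ===== PRECONDITION & SPEC =====
def Spec_calculate_bar_id_of_phrases (phrase_annot : List (String × Int)) (out : List (String × Int × Int)) : Prop := out = calculate_bar_id_of_phrases_alt phrase_annot
instance (phrase_annot : List (String × Int)) (out : List (String × Int × Int)) : Decidable (Spec_calculate_bar_id_of_phrases phrase_annot out) := by unfold Spec_calculate_bar_id_of_phrases; infer_instance

-- ===== CLAIM (what is proved, stated in full; the proofs are below) =====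
def Claim_equal_calculate_bar_id_of_phrases : Prop := ∀ (phrase_annot : List (String × Int)), Dom_calculate_bar_id_of_phrases phrase_annot → Spec_calculate_bar_id_of_phrases phrase_annot (calculate_bar_id_of_phrases phrase_annot)

-- ===== LEMMAS AND PROOFS =====

-- The fused loop with accumulator (r, c) equals r ++ the zip built from boundaries starting at c.
theorem pv_loop_eq_zip (pa : List (String × Int)) :
    ∀ (r : List (String × Int × Int)) (c : Int),
      (pa.foldl
        (fun (s : List (String × Int × Int) × Int) phrase =>
          let phrase_type := phrase.1
          let phrase_length := phrase.2
          let phrase_start_bar_id := s.2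
          let phrase_end_bar_id := s.2 + phrase_length
          (s.1 ++ [(phrase_type, phrase_start_bar_id, phrase_end_bar_id)], s.2 + phrase_length))
        (r, c)).1
      = r ++ ((pa.zip ((c :: pvAccum c (pa.map (·.2))).zip (pvAccum c (pa.map (·.2))))).map
          (fun x => (x.1.1, x.2.1, x.2.2))) := by
  induction pa with
  | nil => simp
  | cons p ps ih =>
      intro r c
      simp only [List.foldl_cons, List.map_cons, pvAccum, List.zip_cons_cons, List.map]
      rw [ih]
      simp

theorem calculate_bar_id_of_phrases_equal (pa : List (String × Int)) :
    calculate_bar_id_of_phrases pa = calculate_bar_id_of_phrases_alt pa := by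
  unfold calculate_bar_id_of_phrases calculate_bar_id_of_phrases_alt
  rw [pv_loop_eq_zip]
  cases pa with
  | nil => simp [pvAccum]
  | cons p ps => simp [pvAccum]

-- ===== VERDICT (by name: the statement is the Claim_ definition above) =====
theorem calculate_bar_id_of_phrases_spec : Claim_equal_calculate_bar_id_of_phrases := by
  intro pa _
  exact calculate_bar_id_of_phrases_equal pa
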